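-- pv_equiv track=rewrite | github.com/fiachra718/sutta_nlp | back.ne/scripts/scratch/fix_kalama_entry.py | find_all_spans
-- ===== SOURCE A (Python) =====
-- def find_all_spans(text, needle):
--     # Find all non-overlapping literal matches, case-sensitive
--     out = []
--     start = 0
--     while True:
--         i = text.find(needle, start)
--         if i == -1: break
--         out.append((i, i+len(needle)))
--         start = i + len(needle)
--     return out
-- ===== SOURCE B (Python) =====
-- def find_all_spans(text, needle):
--     # Derive the non-overlapping match spans from text.split(needle):
--     # between consecutive pieces there is exactly one match.
--     parts = text.split(needle)
--     out = []
--     cursor = len(parts[0])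
--     for part in parts[1:]:
--         out.append((cursor, cursor + len(needle)))
--         cursor += len(needle) + len(part)
--     return out
-- ===== Notes on version B (the rewrite author's own statement) =====
-- stated objective: alternative
-- what changed: Replaces the repeated text.find(needle, start) while-loop with a single text.split(needle) followed by a cursor walk over the pieces that reconstructs each span from the piece lengths; Pre_ excludes the empty needle, on which A loops forever and B raises ValueError from str.split.
import Mathlib
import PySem

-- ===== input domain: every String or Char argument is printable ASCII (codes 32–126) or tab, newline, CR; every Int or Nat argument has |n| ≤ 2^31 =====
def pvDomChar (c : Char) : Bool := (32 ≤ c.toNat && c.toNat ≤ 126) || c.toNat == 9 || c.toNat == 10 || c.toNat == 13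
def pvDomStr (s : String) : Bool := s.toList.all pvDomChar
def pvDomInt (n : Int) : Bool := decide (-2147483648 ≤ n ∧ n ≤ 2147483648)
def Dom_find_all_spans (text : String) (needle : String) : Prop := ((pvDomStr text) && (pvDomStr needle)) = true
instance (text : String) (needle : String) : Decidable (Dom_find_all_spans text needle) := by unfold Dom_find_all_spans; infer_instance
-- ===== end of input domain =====

-- B derives the match spans from text.split(needle) by a cursor walk over the pieces,
-- instead of A's repeated text.find(needle, start) loop (objective: alternative decomposition).


-- ===== PORT A =====
-- A's while-loop: i = text.find(needle, start); emit (i, i+len) and restart at i+len.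
-- The fuel only makes the loop total (on needle = "" Python never terminates; excluded by Pre_);
-- text.length + 2 steps always suffice for a nonempty needle.
def findAllSpansGoA (text needle : List Char) : Nat → Int → List (Int × Int)
  | 0, _ => []
  | fuel + 1, start =>
      let i := PySem.Chars.findFrom text needle start none
      if i = -1 then []
      else (i, i + (needle.length : Int)) :: findAllSpansGoA text needle fuel (i + needle.length)

def find_all_spans (text : String) (needle : String) : List (Int × Int) :=
  findAllSpansGoA text.toList needle.toList (text.toList.length + 2) 0

-- ===== PORT B =====
-- for part in parts[1:]: emit (cursor, cursor+len(needle)); cursor += len(needle)+len(part)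
def walkParts (L : Nat) (cursor : Int) : List (List Char) → List (Int × Int)
  | [] => []
  | p :: rest => (cursor, cursor + (L : Int)) :: walkParts L (cursor + (L : Int) + (p.length : Int)) rest

def find_all_spans_alt (text : String) (needle : String) : List (Int × Int) :=
  match PySem.Chars.split? text.toList needle.toList with
  | none => []          -- Python raises ValueError here (empty needle); excluded by Pre_
  | some [] => []       -- unreachable: split never returns an empty list
  | some (p :: rest) => walkParts needle.toList.length (p.length : Int) rest

-- ===== PRECONDITION & SPEC =====
-- Pre_ excludes only needle = "": there A's while-loop never terminates (find('', start) = start)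
-- and B's str.split raises ValueError.
def Pre_find_all_spans (text : String) (needle : String) : Prop := needle ≠ ""
instance (text : String) (needle : String) : Decidable (Pre_find_all_spans text needle) := by unfold Pre_find_all_spans; infer_instance
def pvWitness_find_all_spans : String × String := ("abcabca", "a")

def Spec_find_all_spans (text : String) (needle : String) (out : List (Int × Int)) : Prop := out = find_all_spans_alt text needle
instance (text : String) (needle : String) (out : List (Int × Int)) : Decidable (Spec_find_all_spans text needle out) := by unfold Spec_find_all_spans; infer_instance

-- ===== CLAIM (what is proved, stated in full; the proofs are below) =====
def Claim_equal_find_all_spans : Prop := ∀ (text : String) (needle : String), Dom_find_all_spans text needle → Pre_find_all_spans text needle → Spec_find_all_spans text needle (find_all_spans text needle)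

-- ===== LEMMAS AND PROOFS =====

-- A clean recursion computing Python's split for a nonempty separator.
def splitSpec (sep : List Char) : List Char → List (List Char)
  | [] => [[]]
  | c :: rest =>
      if sep.isPrefixOf (c :: rest) ∧ sep ≠ [] then
        [] :: splitSpec sep (rest.drop (sep.length - 1))
      else
        (splitSpec sep rest).modifyHead (c :: ·)
  termination_by l => l.length
  decreasing_by
    · simp only [List.length_cons, List.length_drop]
      omega
    · simp

lemma splitSpec_ne_nil (sep l : List Char) : splitSpec sep l ≠ [] := by
  induction l with
  | nil => rw [splitSpec]; simp
  | cons c rest ih =>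
    rw [splitSpec]
    split
    · simp
    · cases h : splitSpec sep rest with
      | nil => exact absurd h ih
      | cons p ps => simp [List.modifyHead]

-- splitOn's fuelled worker computes splitSpec.
lemma splitOn_go_eq (sep : List Char) (hsep : sep ≠ []) :
    ∀ (fuel : Nat) (l cur : List Char) (acc : List (List Char)), l.length < fuel →
      PySem.Chars.splitOn.go sep fuel l cur acc
        = acc.reverse ++ (splitSpec sep l).modifyHead (cur.reverse ++ ·) := by
  intro fuel
  induction fuel with
  | zero => intro l cur acc h; omega
  | succ f ih =>
    intro l cur acc h
    cases l with
    | nil =>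
      simp [PySem.Chars.splitOn.go, splitSpec, List.modifyHead]
    | cons c rest =>
      rw [PySem.Chars.splitOn.go]
      by_cases hp : sep.isPrefixOf (c :: rest) = true
      · rw [if_pos hp]
        have hL : 1 ≤ sep.length := by cases sep <;> simp_all
        have hdrop : List.drop sep.length (c :: rest) = rest.drop (sep.length - 1) := by
          cases sep with
          | nil => simp_all
          | cons a s => simp
        rw [ih _ _ _ (by simp at h ⊢; omega)]
        rw [hdrop]
        conv_rhs => rw [splitSpec]
        rw [if_pos ⟨hp, hsep⟩]
        cases hs : splitSpec sep (rest.drop (sep.length - 1)) with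
        | nil => exact absurd hs (splitSpec_ne_nil _ _)
        | cons p ps => simp [List.modifyHead]
      · rw [if_neg hp]
        rw [ih _ _ _ (by simp at h ⊢; omega)]
        conv_rhs => rw [splitSpec]
        rw [if_neg (by simp [hp])]
        cases hs : splitSpec sep rest with
        | nil => exact absurd hs (splitSpec_ne_nil _ _)
        | cons p ps => simp [List.modifyHead]

lemma splitOn_eq_splitSpec (s sep : List Char) (hsep : sep ≠ []) :
    PySem.Chars.splitOn s sep = splitSpec sep s := by
  unfold PySem.Chars.splitOn
  rw [splitOn_go_eq sep hsep (s.length + 1) s [] [] (by omega)]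
  cases hs : splitSpec sep s with
  | nil => exact absurd hs (splitSpec_ne_nil _ _)
  | cons p ps => simp [List.modifyHead]

-- find.go shift lemma
lemma find_go_shift (sep : List Char) (hsep : sep ≠ []) :
    ∀ (l : List Char) (k : Nat),
      PySem.Chars.find.go sep l k
        = if PySem.Chars.find.go sep l 0 = -1 then -1 else PySem.Chars.find.go sep l 0 + k := by
  intro l
  induction l with
  | nil => intro k; simp [PySem.Chars.find.go, List.isEmpty_iff, hsep]
  | cons c rest ih =>
    intro k
    rw [PySem.Chars.find.go]
    conv_rhs => rw [PySem.Chars.find.go]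
    by_cases hp : sep.isPrefixOf (c :: rest) = true
    · simp [hp]
    · rw [if_neg hp, if_neg hp, ih (k + 1), ih 1]
      have hb : -1 ≤ PySem.Chars.find.go sep rest 0 := by
        have := PySem.Chars.neg_one_le_find rest sep
        simpa [PySem.Chars.find] using this
      split <;> split <;> push_cast <;> omega

-- splitSpec characterised by find (nonempty sep).
lemma splitSpec_find (sep : List Char) (hsep : sep ≠ []) (l : List Char) :
    splitSpec sep l
      = if PySem.Chars.find l sep = -1 then [l]
        else l.take (PySem.Chars.find l sep).toNat
              :: splitSpec sep (l.drop ((PySem.Chars.find l sep).toNat + sep.length)) := by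
  induction l with
  | nil =>
    have : PySem.Chars.find [] sep = -1 := by
      simp [PySem.Chars.find, PySem.Chars.find.go, List.isEmpty_iff, hsep]
    simp [this, splitSpec]
  | cons c rest ih =>
    unfold PySem.Chars.find at *
    rw [PySem.Chars.find.go]
    by_cases hp : sep.isPrefixOf (c :: rest) = true
    · rw [if_pos hp]
      push_cast
      conv_lhs => rw [splitSpec]
      rw [if_pos ⟨hp, hsep⟩]
      have hL : 1 ≤ sep.length := by cases sep <;> simp_all
      have : List.drop (0 + sep.length) (c :: rest) = rest.drop (sep.length - 1) := by
        cases sep with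
        | nil => simp_all
        | cons a s => simp
      rw [this]
      simp
    · rw [if_neg hp]
      rw [find_go_shift sep hsep rest 1]
      push_cast
      conv_lhs => rw [splitSpec]
      rw [if_neg (by simp [hp])]
      by_cases hf : PySem.Chars.find.go sep rest 0 = -1
      · rw [if_pos hf]
        rw [hf] at ih
        simp at ih
        simp [ih, List.modifyHead]
      · rw [if_neg hf]
        have hnn : 0 ≤ PySem.Chars.find.go sep rest 0 := by
          have := PySem.Chars.neg_one_le_find rest sep
          unfold PySem.Chars.find at this
          omega
        have hne : ¬ (PySem.Chars.find.go sep rest 0 + 1 = -1) := by omega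
        rw [if_neg hne]
        rw [if_neg hf] at ih
        rw [ih]
        cases hs : splitSpec sep (rest.drop ((PySem.Chars.find.go sep rest 0).toNat + sep.length)) with
        | nil => exact absurd hs (splitSpec_ne_nil _ _)
        | cons p ps =>
          simp only [List.modifyHead]
          have ht : (PySem.Chars.find.go sep rest 0 + 1).toNat
              = (PySem.Chars.find.go sep rest 0).toNat + 1 := by omega
          rw [ht]
          have harr : (PySem.Chars.find.go sep rest 0).toNat + 1 + sep.length
              = ((PySem.Chars.find.go sep rest 0).toNat + sep.length) + 1 := by omega
          simp [List.take_succ_cons, harr, List.drop_succ_cons, hs]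

-- Occurrence bound: when find succeeds, the match fits inside the string.
lemma find_add_len_le (l sep : List Char) (h : PySem.Chars.find l sep ≠ -1) :
    (PySem.Chars.find l sep).toNat + sep.length ≤ l.length := by
  have hnn : 0 ≤ PySem.Chars.find l sep := by
    have := PySem.Chars.neg_one_le_find l sep
    omega
  have hspec := PySem.Chars.find_spec (s := l) (sub := sep) hnn
  have hpre := hspec.1
  have := List.IsPrefix.length_le hpre
  have hdl : (l.drop (PySem.Chars.find l sep).toNat).length
      = l.length - (PySem.Chars.find l sep).toNat := by simp
  have hle := PySem.Chars.find_le_length l sep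
  omega

-- Main loop lemma: A's fuelled find-loop started at k equals B's cursor walk
-- over splitSpec of the remaining suffix.
lemma loopA_eq_walk (tl sep : List Char) (hsep : sep ≠ []) :
    ∀ (fuel : Nat) (k : Nat), k ≤ tl.length → tl.length - k + 1 ≤ fuel →
      findAllSpansGoA tl sep fuel (k : Int)
        = match splitSpec sep (tl.drop k) with
          | [] => []
          | p :: rest => walkParts sep.length ((k : Int) + (p.length : Int)) rest := by
  intro fuel
  induction fuel with
  | zero => intro k hk hf; omega
  | succ f ih =>
    intro k hk hf
    rw [findAllSpansGoA]
    have hff := PySem.Chars.findFrom_natCast tl sep k hk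
    rw [hff]
    by_cases hfind : PySem.Chars.find (tl.drop k) sep = -1
    · rw [if_pos hfind, if_pos rfl]
      rw [splitSpec_find sep hsep (tl.drop k), if_pos hfind]
      rfl
    · rw [if_neg hfind]
      have hnn : 0 ≤ PySem.Chars.find (tl.drop k) sep := by
        have := PySem.Chars.neg_one_le_find (tl.drop k) sep
        omega
      have hne2 : ¬ ((k : Int) + PySem.Chars.find (tl.drop k) sep = -1) := by omega
      rw [if_neg hne2]
      set i0 : Nat := (PySem.Chars.find (tl.drop k) sep).toNat with hi0
      have hic : PySem.Chars.find (tl.drop k) sep = (i0 : Int) := by omega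
      have hbound : i0 + sep.length ≤ (tl.drop k).length := find_add_len_le _ _ hfind
      have hdl : (tl.drop k).length = tl.length - k := by simp
      have hL : 1 ≤ sep.length := by
        cases sep with
        | nil => exact absurd rfl hsep
        | cons a s => simp
      have hk' : k + i0 + sep.length ≤ tl.length := by omega
      have hcast : (k : Int) + PySem.Chars.find (tl.drop k) sep + (sep.length : Int)
          = ((k + i0 + sep.length : Nat) : Int) := by push_cast [hic]; ring
      rw [hcast]
      rw [ih (k + i0 + sep.length) hk' (by omega)]
      rw [splitSpec_find sep hsep (tl.drop k), if_neg hfind]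
      rw [List.drop_drop] at *
      have hadd : k + (i0 + sep.length) = k + i0 + sep.length := by ring
      rw [hadd]
      cases hs : splitSpec sep (List.drop (k + i0 + sep.length) tl) with
      | nil => exact absurd hs (splitSpec_ne_nil _ _)
      | cons p ps =>
        simp only [walkParts]
        have hlen : ((List.drop k tl).take i0).length = i0 := by
          rw [List.length_take]
          omega
        rw [hlen]
        push_cast [hic]
        ring_nf

-- ===== VERDICT (by name: the statement is the Claim_ definition above) =====
theorem find_all_spans_spec : Claim_equal_find_all_spans := by
  intro text needle _ hpre
  unfold Spec_find_all_spans find_all_spans find_all_spans_alt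
  have hsep : needle.toList ≠ [] := by
    intro h
    exact hpre (String.toList_eq_nil_iff.mp h)
  rw [PySem.Chars.split?]
  rw [if_neg (by simp [List.isEmpty_iff, hsep])]
  rw [splitOn_eq_splitSpec _ _ hsep]
  have h0 := loopA_eq_walk text.toList needle.toList hsep (text.toList.length + 2) 0
    (by omega) (by omega)
  simp only [Int.natCast_zero, List.drop_zero] at h0
  rw [h0]
  cases hs : splitSpec needle.toList text.toList with
  | nil => exact absurd hs (splitSpec_ne_nil _ _)
  | cons p ps => simp
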